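-- pv_equiv track=rewrite | github.com/amtega/ansible_role_iptables | filter_plugins/iptables_filters.py | iptables_attrs_subset
-- ===== SOURCE A (Python) =====
-- def iptables_attrs_subset(d, attributes, ignore_missing=False):
--     """Extract a list of attributes from a dict.
--
--     Args:
--         d: dict to get the attributes subset.
--         attributes (list): name of the attributes to extract.
--         ignore_missing (bool): ignore missing attributes.
--
--     Returns:
--         dict: containing only the specified attributes.
--     """
--     subset = dict()
--     for attribute in attributes:
--         if attribute in d:
--             subset[attribute] = d[attribute]
--         elif not ignore_missing:
--             raise AttributeError("Attribute '%s' not found" % attribute)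
--
--     return subset
-- ===== SOURCE B (Python) =====
-- def iptables_attrs_subset(d, attributes, ignore_missing=False):
--     """Extract a list of attributes from a dict.
--
--     Two-pass re-implementation: first validate (collect missing attributes),
--     then build the subset from the present attribute names, deduplicated in
--     first-occurrence order.
--     """
--     missing = [a for a in attributes if a not in d]
--     if missing and not ignore_missing:
--         raise AttributeError("Attribute '%s' not found" % missing[0])
--     keys = dict.fromkeys(a for a in attributes if a in d)
--     return {a: d[a] for a in keys}
-- ===== Notes on version B (the rewrite author's own statement) =====
-- stated objective: alternative
-- what changed: A fuses validation and construction in one loop that raises mid-build; B splits it into a validation pass collecting missing attributes, then builds the result from the deduplicated present attribute names in a separate map-style pass.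
import Mathlib
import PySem

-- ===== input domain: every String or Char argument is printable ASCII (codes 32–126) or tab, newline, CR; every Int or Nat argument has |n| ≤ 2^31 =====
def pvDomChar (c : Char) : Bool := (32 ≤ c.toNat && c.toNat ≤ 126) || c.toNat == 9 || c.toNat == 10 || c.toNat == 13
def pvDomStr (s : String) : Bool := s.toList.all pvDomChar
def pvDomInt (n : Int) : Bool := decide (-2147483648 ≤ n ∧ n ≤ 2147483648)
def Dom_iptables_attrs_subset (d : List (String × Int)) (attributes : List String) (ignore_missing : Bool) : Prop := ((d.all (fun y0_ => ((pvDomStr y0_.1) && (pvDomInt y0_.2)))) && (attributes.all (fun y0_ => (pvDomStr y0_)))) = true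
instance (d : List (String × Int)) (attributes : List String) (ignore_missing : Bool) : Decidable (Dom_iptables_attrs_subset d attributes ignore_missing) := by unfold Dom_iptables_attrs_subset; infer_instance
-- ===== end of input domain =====

-- B splits A's fused validate-and-build loop into a validation pass plus a separate
-- dedup-and-map construction pass; equivalence is proved on inputs where A returns (Pre_ excludes A's AttributeError).


-- ===== PORT A =====
-- the single fused loop of A: 'some subset' on normal return, 'none' where the Python raises AttributeError
def iptSubsetGo (d : List (String × Int)) (attrs : List String) (ignore_missing : Bool)
    (subset : PySem.Dict String Int) : Option (PySem.Dict String Int) :=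
  match attrs with
  | [] => some subset
  | a :: rest =>
    match List.lookup a d with                       -- 'attribute in d' / 'd[attribute]' (assoc-list dict: first match)
    | some v => iptSubsetGo d rest ignore_missing (subset.insert a v)
    | none => if ignore_missing then iptSubsetGo d rest ignore_missing subset
              else none                              -- raise AttributeError

def iptables_attrs_subset (d : List (String × Int)) (attributes : List String) (ignore_missing : Bool) : List (String × Int) :=
  match iptSubsetGo d attributes ignore_missing PySem.Dict.empty with
  | some subset => subset.items
  | none => []                                       -- Python raises here; excluded by Pre_

-- ===== PORT B =====
def iptables_attrs_subset_alt (d : List (String × Int)) (attributes : List String) (ignore_missing : Bool) : List (String × Int) :=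
  let missing := attributes.filter (fun a => (List.lookup a d).isNone)
  if !missing.isEmpty && !ignore_missing then []     -- raise AttributeError; excluded by Pre_
  else
    -- keys = dict.fromkeys(a for a in attributes if a in d)  (ordered dedup)
    let keys := PySem.List.dedup (attributes.filter (fun a => (List.lookup a d).isSome))
    -- {a: d[a] for a in keys}: keys are distinct, so the dict's items are this map; d[a] is total since a ∈ d
    keys.map (fun a => (a, (List.lookup a d).getD 0))

-- ===== PRECONDITION & SPEC =====
-- Pre_ excludes exactly the inputs where A raises AttributeError: a requested attribute missing with ignore_missing false.
def Pre_iptables_attrs_subset (d : List (String × Int)) (attributes : List String) (ignore_missing : Bool) : Prop :=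
  ∀ a ∈ attributes, ignore_missing = true ∨ (List.lookup a d).isSome = true
instance (d : List (String × Int)) (attributes : List String) (ignore_missing : Bool) : Decidable (Pre_iptables_attrs_subset d attributes ignore_missing) := by unfold Pre_iptables_attrs_subset; infer_instance

def pvWitness_iptables_attrs_subset : (List (String × Int)) × List String × Bool :=
  ([("src", 1), ("dst", 2), ("port", 22)], ["port", "src"], false)

def Spec_iptables_attrs_subset (d : List (String × Int)) (attributes : List String) (ignore_missing : Bool) (out : List (String × Int)) : Prop := out = iptables_attrs_subset_alt d attributes ignore_missing
instance (d : List (String × Int)) (attributes : List String) (ignore_missing : Bool) (out : List (String × Int)) : Decidable (Spec_iptables_attrs_subset d attributes ignore_missing out) := by unfold Spec_iptables_attrs_subset; infer_instance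

-- ===== CLAIM (what is proved, stated in full; the proofs are below) =====
def Claim_equal_iptables_attrs_subset : Prop := ∀ (d : List (String × Int)) (attributes : List String) (ignore_missing : Bool), Dom_iptables_attrs_subset d attributes ignore_missing → Pre_iptables_attrs_subset d attributes ignore_missing → Spec_iptables_attrs_subset d attributes ignore_missing (iptables_attrs_subset d attributes ignore_missing)

-- ===== LEMMAS AND PROOFS =====

-- A's loop never raises under Pre_, and equals the plain fold of its step function.
theorem iptSubsetGo_eq_some (d : List (String × Int)) (ign : Bool) :
    ∀ (attrs : List String) (s : PySem.Dict String Int),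
      (∀ a ∈ attrs, ign = true ∨ (List.lookup a d).isSome = true) →
      iptSubsetGo d attrs ign s =
        some (attrs.foldl (fun s a =>
          match List.lookup a d with
          | some v => s.insert a v
          | none => s) s) := by
  intro attrs
  induction attrs with
  | nil => intro s _; rfl
  | cons a rest ih =>
    intro s hPre
    have ha := hPre a (by simp)
    have hrest : ∀ b ∈ rest, ign = true ∨ (List.lookup b d).isSome = true :=
      fun b hb => hPre b (by simp [hb])
    cases hl : List.lookup a d with
    | some v => simp [iptSubsetGo, hl, ih _ hrest]
    | none =>
      rcases ha with h | h
      · subst h; simpa [iptSubsetGo, hl] using ih _ hrest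
      · simp [hl] at h

-- the fold skips absent keys: it equals the insert-fold over the present attributes
theorem foldl_skip_eq_filter (d : List (String × Int)) :
    ∀ (attrs : List String) (s : PySem.Dict String Int),
      attrs.foldl (fun s a =>
          match List.lookup a d with
          | some v => s.insert a v
          | none => s) s =
      (attrs.filter (fun a => (List.lookup a d).isSome)).foldl
          (fun s a => s.insert a ((List.lookup a d).getD 0)) s := by
  intro attrs
  induction attrs with
  | nil => intro s; rfl
  | cons a rest ih =>
    intro s
    cases hl : List.lookup a d with
    | some v => simp [List.foldl, List.filter, hl, ih]
    | none => simp [List.foldl, List.filter, hl, ih]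

-- items of an insert-fold whose value depends only on the key, from a dict whose items are already in that shape
theorem items_foldl_insert_keyval (v : String → Int) :
    ∀ (l ks : List String), ks.Nodup →
      (l.foldl (fun s a => s.insert a (v a))
          (PySem.Dict.mk (ks.map (fun a => (a, v a))))).items =
      (PySem.Set.update ks l).map (fun a => (a, v a)) := by
  intro l
  induction l with
  | nil => intro ks _; simp [PySem.Set.update]
  | cons a rest ih =>
    intro ks hnd
    have hstep : (PySem.Dict.mk (ks.map (fun a => (a, v a)))).insert a (v a)
        = PySem.Dict.mk ((PySem.Set.add ks a).map (fun b => (b, v b))) := by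
      apply PySem.Dict.ext
      by_cases ha : a ∈ ks
      · rw [PySem.Dict.items_insert_of_contains]
        · have hadd : PySem.Set.add ks a = ks := by
            simp [PySem.Set.add, PySem.Set.contains, ha]
          rw [hadd]
          show (ks.map (fun b => (b, v b))).map _ = ks.map (fun b => (b, v b))
          rw [List.map_map]
          apply List.map_congr_left
          intro b hb
          by_cases hba : b = a
          · subst hba; simp
          · simp [hba]
        · simp
          exact ha
      · rw [PySem.Dict.items_insert_of_not_contains]
        · have hadd : PySem.Set.add ks a = ks ++ [a] := by
            simp [PySem.Set.add, PySem.Set.contains, ha]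
          rw [hadd]
          simp
        · simp
          intro x hx hxa; exact ha (hxa ▸ hx)
    have hnd' : (PySem.Set.add ks a).Nodup := by
      by_cases ha : a ∈ ks
      · simpa [PySem.Set.add, PySem.Set.contains, ha] using hnd
      · have : PySem.Set.add ks a = ks ++ [a] := by
          simp [PySem.Set.add, PySem.Set.contains, ha]
        rw [this]
        exact List.Nodup.append hnd (List.nodup_singleton a)
          (by intro x hx hxa; simp only [List.mem_singleton] at hxa; exact ha (hxa ▸ hx))
    calc ((a :: rest).foldl (fun s b => s.insert b (v b))
            (PySem.Dict.mk (ks.map (fun b => (b, v b))))).items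
        = (rest.foldl (fun s b => s.insert b (v b))
            (PySem.Dict.mk ((PySem.Set.add ks a).map (fun b => (b, v b))))).items := by
          simp [List.foldl, hstep]
      _ = (PySem.Set.update (PySem.Set.add ks a) rest).map (fun b => (b, v b)) := ih _ hnd'
      _ = (PySem.Set.update ks (a :: rest)).map (fun b => (b, v b)) := by
          simp [PySem.Set.update, List.foldl]

-- ===== VERDICT (by name: the statement is the Claim_ definition above) =====
theorem iptables_attrs_subset_spec : Claim_equal_iptables_attrs_subset := by
  intro d attrs ign _ hPre
  unfold Spec_iptables_attrs_subset iptables_attrs_subset iptables_attrs_subset_alt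
  rw [iptSubsetGo_eq_some d ign attrs PySem.Dict.empty hPre]
  have hmiss : (!(attrs.filter (fun a => (List.lookup a d).isNone)).isEmpty && !ign) = false := by
    cases hign : ign with
    | true => simp
    | false =>
      have : attrs.filter (fun a => (List.lookup a d).isNone) = [] := by
        apply List.filter_eq_nil_iff.mpr
        intro a ha
        rcases hPre a ha with h | h
        · simp [hign] at h
        · simp only [Option.isNone_iff_eq_none]
          exact Option.ne_none_iff_isSome.mpr h
      simp [this]
  simp only [hmiss, Bool.false_eq_true, if_false]
  rw [foldl_skip_eq_filter]
  have hempty : (PySem.Dict.empty : PySem.Dict String Int)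
      = PySem.Dict.mk (([] : List String).map (fun a => (a, (List.lookup a d).getD 0))) := rfl
  rw [hempty, items_foldl_insert_keyval (fun a => (List.lookup a d).getD 0) _ [] List.nodup_nil]
  simp [PySem.List.dedup_eq_ofList, PySem.Set.ofList, PySem.Set.update]
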